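-- pv_equiv track=rewrite | github.com/mlcfoundation/NFHS | streamlit_app.py | state_dist_to_state_dist_dict
-- ===== SOURCE A (Python) =====
-- def state_dist_to_state_dist_dict(districts_states):
--     db = {}
--     for district_state in districts_states:
--         district = district_state.split(',')[0]
--         state = district_state.split(',')[1].strip()
--         if state not in db:
--             db[state] = []
--         db[state].append(district)
--     return db
-- ===== SOURCE B (Python) =====
-- def state_dist_to_state_dist_dict(districts_states):
--     # Same grouping, different decomposition: parse once into (district, state)
--     # pairs, take the distinct states in first-appearance order, then build the
--     # dict by filtering the pair list per state.
--     pairs = [(s.split(',')[0], s.split(',')[1].strip()) for s in districts_states]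
--     states = list(dict.fromkeys(st for _, st in pairs))
--     return {st: [d for d, s2 in pairs if s2 == st] for st in states}
-- ===== Notes on version B (the rewrite author's own statement) =====
-- stated objective: alternative
-- what changed: Replaces the incremental dict accumulation (membership test + in-place append per element) with a parse-once pair list, an ordered dedup of the states, and a per-state filter that assembles each group in one comprehension.
import Mathlib
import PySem

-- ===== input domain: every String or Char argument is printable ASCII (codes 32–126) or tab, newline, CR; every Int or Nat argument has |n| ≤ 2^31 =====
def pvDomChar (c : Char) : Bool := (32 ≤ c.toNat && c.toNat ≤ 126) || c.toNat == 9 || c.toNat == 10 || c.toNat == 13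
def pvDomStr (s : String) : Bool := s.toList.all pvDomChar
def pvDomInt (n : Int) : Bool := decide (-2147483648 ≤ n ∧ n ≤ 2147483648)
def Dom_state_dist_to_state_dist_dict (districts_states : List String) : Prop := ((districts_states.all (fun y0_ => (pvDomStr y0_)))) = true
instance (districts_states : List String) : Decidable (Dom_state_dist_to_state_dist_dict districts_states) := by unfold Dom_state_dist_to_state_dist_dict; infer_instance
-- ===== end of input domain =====

-- B groups via a parse-once pair list + ordered dedup of states + per-state filter,
-- instead of A's incremental dict accumulation; same return value on Pre_.


-- ===== PORT A =====
def state_dist_to_state_dist_dict (districts_states : List String) : List (String × List String) :=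
  (districts_states.foldl (fun db district_state =>
      let district := (PySem.List.pyGet? ((PySem.Str.split? district_state ",").getD []) 0).getD ""
      let state := PySem.Str.strip ((PySem.List.pyGet? ((PySem.Str.split? district_state ",").getD []) 1).getD "")
      let db := if db.contains state then db else db.insert state ([] : List String)
      db.modify state [] (fun v => v ++ [district])
    ) PySem.Dict.empty).items

-- ===== PORT B =====
def state_dist_to_state_dist_dict_alt (districts_states : List String) : List (String × List String) :=
  let pairs := districts_states.map (fun s =>
      ((PySem.List.pyGet? ((PySem.Str.split? s ",").getD []) 0).getD "",
       PySem.Str.strip ((PySem.List.pyGet? ((PySem.Str.split? s ",").getD []) 1).getD "")))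
  let states := PySem.List.dedup (pairs.map (fun p => p.2))
  states.map (fun st => (st, (pairs.filter (fun p => p.2 == st)).map (fun p => p.1)))

-- ===== PRECONDITION & SPEC =====
-- Pre_ excludes exactly the inputs where some string has no comma: there s.split(',')[1]
-- raises IndexError in Python A (and in B).
def Pre_state_dist_to_state_dist_dict (districts_states : List String) : Prop :=
  ∀ s ∈ districts_states, PySem.Str.isIn "," s = true
instance (districts_states : List String) : Decidable (Pre_state_dist_to_state_dist_dict districts_states) := by unfold Pre_state_dist_to_state_dist_dict; infer_instance
def pvWitness_state_dist_to_state_dist_dict : List String :=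
  ["Mumbai, Maharashtra", "Pune, Maharashtra", "Patna, Bihar"]

def Spec_state_dist_to_state_dist_dict (districts_states : List String) (out : List (String × List String)) : Prop := out = state_dist_to_state_dist_dict_alt districts_states
instance (districts_states : List String) (out : List (String × List String)) : Decidable (Spec_state_dist_to_state_dist_dict districts_states out) := by unfold Spec_state_dist_to_state_dist_dict; infer_instance

-- ===== CLAIM (what is proved, stated in full; the proofs are below) =====
def Claim_equal_state_dist_to_state_dist_dict : Prop := ∀ (districts_states : List String), Dom_state_dist_to_state_dist_dict districts_states → Pre_state_dist_to_state_dist_dict districts_states → Spec_state_dist_to_state_dist_dict districts_states (state_dist_to_state_dist_dict districts_states)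

-- ===== LEMMAS AND PROOFS =====

-- the parsed district and state of one input string
def pvDist (s : String) : String :=
  (PySem.List.pyGet? ((PySem.Str.split? s ",").getD []) 0).getD ""
def pvState (s : String) : String :=
  PySem.Str.strip ((PySem.List.pyGet? ((PySem.Str.split? s ",").getD []) 1).getD "")

-- A's loop body ('if absent, insert []; then append') is a single Dict.modify
theorem pv_stepA_eq_modify (db : PySem.Dict String (List String)) (st d : String) :
    ((if db.contains st then db else db.insert st []).modify st [] (· ++ [d]))
    = db.modify st [] (· ++ [d]) := by
  by_cases h : db.contains st
  · simp [h]
  · simp only [h, Bool.false_eq_true, not_false_eq_true, if_neg, PySem.Dict.modify,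
      PySem.Dict.getD_insert_self, PySem.Dict.insert_insert_self,
      PySem.Dict.getD_of_not_contains db ([] : List String) (by simpa using h),
      List.nil_append]

theorem pv_fold_items (l : List String) :
    state_dist_to_state_dist_dict l
    = (PySem.Set.ofList (l.map pvState)).map
        (fun k => (k, ((l.map (fun s => (pvState s, pvDist s))).filter
                        (fun p => p.1 == k)).map (fun p => p.2))) := by
  unfold state_dist_to_state_dist_dict
  have hstep : (fun (db : PySem.Dict String (List String)) (district_state : String) =>
      let district := (PySem.List.pyGet? ((PySem.Str.split? district_state ",").getD []) 0).getD ""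
      let state := PySem.Str.strip ((PySem.List.pyGet? ((PySem.Str.split? district_state ",").getD []) 1).getD "")
      let db := if db.contains state then db else db.insert state ([] : List String)
      db.modify state [] (fun v => v ++ [district]))
      = (fun db s => db.modify (pvState s) [] (· ++ [pvDist s])) := by
    funext db s
    exact pv_stepA_eq_modify db (pvState s) (pvDist s)
  rw [hstep]
  have hfold : l.foldl (fun db s => db.modify (pvState s) [] (· ++ [pvDist s])) PySem.Dict.empty
      = (l.map (fun s => (pvState s, pvDist s))).foldl
          (fun d p => d.modify p.1 [] (· ++ [p.2])) PySem.Dict.empty := by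
    rw [List.foldl_map]
  rw [hfold]
  set sp := l.map (fun s => (pvState s, pvDist s)) with hsp
  have hnd : ((sp.foldl (fun d p => d.modify p.1 [] (· ++ [p.2])) PySem.Dict.empty)).keys.Nodup := by
    exact PySem.Dict.nodup_keys_foldl_modify_key sp Prod.fst [] (fun _ p v => v ++ [p.2]) _
      (by simp)
  rw [PySem.Dict.items_eq_map_keys _ hnd []]
  have hkeys : ((sp.foldl (fun d p => d.modify p.1 [] (· ++ [p.2])) PySem.Dict.empty)).keys
      = PySem.Set.ofList (l.map pvState) := by
    rw [PySem.Dict.keys_foldl_modify_key sp Prod.fst [] (fun _ p v => v ++ [p.2])]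
    simp [hsp, List.map_map, PySem.Set.ofList, PySem.Set.update, PySem.Dict.keys_empty, Function.comp_def]
  rw [hkeys]
  apply List.map_congr_left
  intro k _
  rw [PySem.Dict.getD_foldl_modify_append sp PySem.Dict.empty k]
  simp [PySem.Dict.getD_empty]

-- ===== VERDICT (by name: the statement is the Claim_ definition above) =====
theorem state_dist_to_state_dist_dict_spec : Claim_equal_state_dist_to_state_dist_dict := by
  intro l _ _
  unfold Spec_state_dist_to_state_dist_dict state_dist_to_state_dist_dict_alt
  rw [pv_fold_items]
  simp only [PySem.List.dedup_eq_ofList, List.map_map, List.filter_map, Function.comp_def]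
  rfl
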